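-- pv_equiv track=rewrite | github.com/moosmiddelkoop/Advent-of-code | aoc-2022/9.py | head_positions
-- ===== SOURCE A (Python) =====
-- def head_positions(instructions):
--
--     starting_pos = (0,0)
--     head_visited = [starting_pos]
--
--     for instruction in instructions:
--         direction = instruction[0]
--         num_moves = instruction[1]
--
--         for _ in range(int(num_moves)):
--             last_position = head_visited[-1]
--
--             if direction == 'L':
--                 new_position = (last_position[0] - 1, last_position[1])
--                 head_visited.append(new_position)
--
--             elif direction == 'R':
--                 new_position = (last_position[0] + 1, last_position[1])
--                 head_visited.append(new_position)
--
--             elif direction == 'U':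
--                 new_position = (last_position[0], last_position[1] + 1)
--                 head_visited.append(new_position)
--
--             elif direction == 'D':
--                 new_position = (last_position[0], last_position[1] - 1)
--                 head_visited.append(new_position)
--
--     return head_visited
-- ===== SOURCE B (Python) =====
-- DELTAS = {'L': (-1, 0), 'R': (1, 0), 'U': (0, 1), 'D': (0, -1)}
--
-- def head_positions(instructions):
--     # Phase 1: flatten the instructions into one list of unit deltas.
--     deltas = []
--     for direction, num_moves in instructions:
--         n = int(num_moves)
--         d = DELTAS.get(direction)
--         if d is not None:
--             deltas += [d] * n
--     # Phase 2: prefix-sum the deltas starting at the origin.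
--     x, y = 0, 0
--     result = [(0, 0)]
--     for dx, dy in deltas:
--         x += dx
--         y += dy
--         result.append((x, y))
--     return result
-- ===== Notes on version B (the rewrite author's own statement) =====
-- stated objective: alternative
-- what changed: A walks a nested stateful loop, appending each new position computed from head_visited[-1] inside per-direction if/elif branches; B decomposes into two flat passes: flatten the instructions to a list of unit (dx,dy) deltas via a direction dict, then prefix-sum the deltas from (0,0).
import Mathlib
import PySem

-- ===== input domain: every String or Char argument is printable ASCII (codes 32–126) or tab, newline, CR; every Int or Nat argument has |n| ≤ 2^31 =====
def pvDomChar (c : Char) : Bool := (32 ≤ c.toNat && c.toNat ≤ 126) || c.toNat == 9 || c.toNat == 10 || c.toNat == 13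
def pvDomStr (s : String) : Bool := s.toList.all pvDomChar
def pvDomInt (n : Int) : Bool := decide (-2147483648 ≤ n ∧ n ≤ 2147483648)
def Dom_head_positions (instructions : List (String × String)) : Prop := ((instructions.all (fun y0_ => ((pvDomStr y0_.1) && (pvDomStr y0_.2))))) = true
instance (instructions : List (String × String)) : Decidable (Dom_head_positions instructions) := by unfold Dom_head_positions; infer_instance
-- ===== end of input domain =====

-- B replaces A's nested stateful stepping loop by a two-phase decomposition
-- (flatten instructions to unit deltas via a dict, then prefix-sum them); objective: alternative.

-- ===== PORT A =====
-- A's nested loop: fold over instructions; inner loop over range(int(num_moves)) appending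
-- to head_visited, reading head_visited[-1] each step (the list is never empty, so the
-- pyGetD default (0,0) is never used).
def head_positions (instructions : List (String × String)) : List (Int × Int) :=
  instructions.foldl (fun head_visited instruction =>
    let direction := instruction.1
    let num_moves := instruction.2
    (PySem.List.pyRange 0 ((PySem.Int.ofStr? num_moves).getD 0) 1).foldl (fun head_visited _ =>
      let last_position := PySem.List.pyGetD head_visited (-1) (0, 0)
      if direction == "L" then head_visited ++ [(last_position.1 - 1, last_position.2)]
      else if direction == "R" then head_visited ++ [(last_position.1 + 1, last_position.2)]
      else if direction == "U" then head_visited ++ [(last_position.1, last_position.2 + 1)]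
      else if direction == "D" then head_visited ++ [(last_position.1, last_position.2 - 1)]
      else head_visited) head_visited) [((0 : Int), (0 : Int))]

-- ===== PORT B =====
def pvDELTAS : PySem.Dict String (Int × Int) :=
  PySem.Dict.ofList [("L", (-1, 0)), ("R", (1, 0)), ("U", (0, 1)), ("D", (0, -1))]

def head_positions_alt (instructions : List (String × String)) : List (Int × Int) :=
  -- Phase 1: flatten into unit deltas ([d] * n is empty for n ≤ 0, hence .toNat).
  let deltas := instructions.foldl (fun acc instruction =>
    let n := (PySem.Int.ofStr? instruction.2).getD 0
    match pvDELTAS.get? instruction.1 with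
    | some d => acc ++ List.replicate n.toNat d
    | none => acc) []
  -- Phase 2: prefix-sum the deltas starting at the origin.
  let st := deltas.foldl (fun (st : Int × Int × List (Int × Int)) d =>
    let x := st.1 + d.1
    let y := st.2.1 + d.2
    (x, y, st.2.2 ++ [(x, y)])) (0, 0, [((0 : Int), (0 : Int))])
  st.2.2

-- ===== PRECONDITION & SPEC =====
-- Pre_ excludes exactly the inputs where int(num_moves) raises ValueError in both programs.
def Pre_head_positions (instructions : List (String × String)) : Prop :=
  ∀ p ∈ instructions, (PySem.Int.ofStr? p.2).isSome
instance (instructions : List (String × String)) : Decidable (Pre_head_positions instructions) := by unfold Pre_head_positions; infer_instance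

def pvWitness_head_positions : (List (String × String)) := [("R", "2"), ("U", "1"), ("X", "3")]

def Spec_head_positions (instructions : List (String × String)) (out : List (Int × Int)) : Prop := out = head_positions_alt instructions
instance (instructions : List (String × String)) (out : List (Int × Int)) : Decidable (Spec_head_positions instructions out) := by unfold Spec_head_positions; infer_instance

-- ===== CLAIM (what is proved, stated in full; the proofs are below) =====
def Claim_equal_head_positions : Prop := ∀ (instructions : List (String × String)), Dom_head_positions instructions → Pre_head_positions instructions → Spec_head_positions instructions (head_positions instructions)

-- ===== LEMMAS AND PROOFS =====

-- canonical form: positions visited from p along a list of deltas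
def pvScan (p : Int × Int) : List (Int × Int) → List (Int × Int)
  | [] => []
  | d :: ds => (p.1 + d.1, p.2 + d.2) :: pvScan (p.1 + d.1, p.2 + d.2) ds

def pvEnd (p : Int × Int) (ds : List (Int × Int)) : Int × Int :=
  ds.foldl (fun q d => (q.1 + d.1, q.2 + d.2)) p

def pvFlat (instructions : List (String × String)) : List (Int × Int) :=
  instructions.flatMap (fun instruction =>
    match pvDELTAS.get? instruction.1 with
    | some d => List.replicate ((PySem.Int.ofStr? instruction.2).getD 0).toNat d
    | none => [])

theorem pvScan_append (ds es : List (Int × Int)) : ∀ p,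
    pvScan p (ds ++ es) = pvScan p ds ++ pvScan (pvEnd p ds) es := by
  induction ds with
  | nil => intro p; simp [pvScan, pvEnd]
  | cons d ds ih =>
    intro p
    have h := ih (p.1 + d.1, p.2 + d.2)
    simp only [pvScan, pvEnd, List.foldl_cons, List.cons_append] at h ⊢
    rw [h]

theorem pvShape (ds : List (Int × Int)) : ∀ p (l : List (Int × Int)),
    ∃ l', l ++ [p] ++ pvScan p ds = l' ++ [pvEnd p ds] := by
  induction ds with
  | nil => intro p l; exact ⟨l, by simp [pvScan, pvEnd]⟩
  | cons d ds ih =>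
    intro p l
    obtain ⟨l', h⟩ := ih (p.1 + d.1, p.2 + d.2) (l ++ [p])
    refine ⟨l', ?_⟩
    simpa [pvScan, pvEnd, List.foldl_cons, List.append_assoc] using h

-- A's inner loop with a fixed delta appends a scan of replicated deltas
theorem pvInner (step : List (Int × Int) → List (Int × Int))
    (d : Int × Int)
    (hstep : ∀ (l : List (Int × Int)) (p : Int × Int),
      step (l ++ [p]) = (l ++ [p]) ++ [(p.1 + d.1, p.2 + d.2)]) :
    ∀ (k : Nat) (l : List (Int × Int)) (p : Int × Int),
      Nat.rec (motive := fun _ => List (Int × Int)) (l ++ [p]) (fun _ acc => step acc) k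
        = (l ++ [p]) ++ pvScan p (List.replicate k d) := by
  intro k
  induction k with
  | zero => intro l p; simp [pvScan]
  | succ k ih =>
    intro l p
    show step (Nat.rec (motive := fun _ => List (Int × Int)) (l ++ [p]) (fun _ acc => step acc) k)
        = _
    rw [ih l p]
    rcases pvShape (List.replicate k d) p l with ⟨l', hl⟩
    rw [List.append_assoc] at hl ⊢
    rw [hl, hstep l' _]
    have : pvScan p (List.replicate (k+1) d)
        = pvScan p (List.replicate k d ++ [d]) := by
      rw [← List.replicate_succ' ]
    rw [this, pvScan_append]
    have h2 : l ++ [p] ++ (pvScan p (List.replicate k d) ++ pvScan (pvEnd p (List.replicate k d)) [d])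
        = (l ++ ([p] ++ pvScan p (List.replicate k d))) ++ pvScan (pvEnd p (List.replicate k d)) [d] := by
      simp
    rw [h2, hl]
    simp [pvScan]

-- a foldl that ignores its elements is an iterate of the step
theorem pvFoldlConst {α β : Type} (g : α → α) (xs : List β) : ∀ (init : α),
    xs.foldl (fun acc _ => g acc) init
      = Nat.rec (motive := fun _ => α) init (fun _ acc => g acc) xs.length := by
  induction xs with
  | nil => intro init; rfl
  | cons x xs ih =>
    intro init
    simp only [List.foldl_cons, List.length_cons, ih]
    clear ih
    induction xs.length generalizing init with
    | zero => rfl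
    | succ n ih => exact congrArg g (ih init) ▸ rfl

-- named copies of the two ports' loop bodies (connected to the ports by rfl)
def pvFA (head_visited : List (Int × Int)) (instruction : String × String) : List (Int × Int) :=
  let direction := instruction.1
  let num_moves := instruction.2
  (PySem.List.pyRange 0 ((PySem.Int.ofStr? num_moves).getD 0) 1).foldl (fun head_visited _ =>
    let last_position := PySem.List.pyGetD head_visited (-1) (0, 0)
    if direction == "L" then head_visited ++ [(last_position.1 - 1, last_position.2)]
    else if direction == "R" then head_visited ++ [(last_position.1 + 1, last_position.2)]
    else if direction == "U" then head_visited ++ [(last_position.1, last_position.2 + 1)]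
    else if direction == "D" then head_visited ++ [(last_position.1, last_position.2 - 1)]
    else head_visited) head_visited

def pvGB (acc : List (Int × Int)) (instruction : String × String) : List (Int × Int) :=
  let n := (PySem.Int.ofStr? instruction.2).getD 0
  match pvDELTAS.get? instruction.1 with
  | some d => acc ++ List.replicate n.toNat d
  | none => acc

def pvF2 (st : Int × Int × List (Int × Int)) (d : Int × Int) : Int × Int × List (Int × Int) :=
  let x := st.1 + d.1
  let y := st.2.1 + d.2
  (x, y, st.2.2 ++ [(x, y)])

-- the one-instruction contribution to the flat delta list
def pvFlatOne (instruction : String × String) : List (Int × Int) :=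
  match pvDELTAS.get? instruction.1 with
  | some d => List.replicate ((PySem.Int.ofStr? instruction.2).getD 0).toNat d
  | none => []

theorem pvFlat_cons (i : String × String) (ins : List (String × String)) :
    pvFlat (i :: ins) = pvFlatOne i ++ pvFlat ins := by
  simp [pvFlat, pvFlatOne]

theorem pvGet_none (dir : String) (h1 : ¬ dir = "L") (h2 : ¬ dir = "R") (h3 : ¬ dir = "U")
    (h4 : ¬ dir = "D") : pvDELTAS.get? dir = none := by
  have h : pvDELTAS = PySem.Dict.mk [("L", (-1, 0)), ("R", (1, 0)), ("U", (0, 1)), ("D", (0, -1))] := by decide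
  rw [h]
  simp [PySem.Dict.get?, Ne.symm h1, Ne.symm h2, Ne.symm h3, Ne.symm h4]

-- A's handling of one instruction = appending the scan of that instruction's deltas
theorem pvA_step (i : String × String) (l : List (Int × Int)) (p : Int × Int) :
    pvFA (l ++ [p]) i = (l ++ [p]) ++ pvScan p (pvFlatOne i) := by
  obtain ⟨dir, num⟩ := i
  simp only [pvFA, pvFlatOne]
  have hlen : (PySem.List.pyRange 0 ((PySem.Int.ofStr? num).getD 0) 1).length
      = ((PySem.Int.ofStr? num).getD 0).toNat := by
    simp [PySem.List.length_pyRange_one]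
  by_cases h1 : dir = "L"
  · subst h1
    rw [pvFoldlConst, hlen]
    rw [pvInner _ ((-1 : Int), (0 : Int)) (fun l0 p0 => by
      simp [PySem.List.pyGetD_neg_one_append_singleton, sub_eq_add_neg])]
    have : pvDELTAS.get? "L" = some ((-1 : Int), (0 : Int)) := by decide
    rw [this]
  · by_cases h2 : dir = "R"
    · subst h2
      rw [pvFoldlConst, hlen]
      rw [pvInner _ ((1 : Int), (0 : Int)) (fun l0 p0 => by
        simp [PySem.List.pyGetD_neg_one_append_singleton])]
      have : pvDELTAS.get? "R" = some ((1 : Int), (0 : Int)) := by decide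
      rw [this]
    · by_cases h3 : dir = "U"
      · subst h3
        rw [pvFoldlConst, hlen]
        rw [pvInner _ ((0 : Int), (1 : Int)) (fun l0 p0 => by
          simp [PySem.List.pyGetD_neg_one_append_singleton])]
        have : pvDELTAS.get? "U" = some ((0 : Int), (1 : Int)) := by decide
        rw [this]
      · by_cases h4 : dir = "D"
        · subst h4
          rw [pvFoldlConst, hlen]
          rw [pvInner _ ((0 : Int), (-1 : Int)) (fun l0 p0 => by
            simp [PySem.List.pyGetD_neg_one_append_singleton, sub_eq_add_neg])]
          have : pvDELTAS.get? "D" = some ((0 : Int), (-1 : Int)) := by decide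
          rw [this]
        · have hd := pvGet_none dir h1 h2 h3 h4
          rw [hd]
          have hb1 : (dir == "L") = false := by simp [h1]
          have hb2 : (dir == "R") = false := by simp [h2]
          have hb3 : (dir == "U") = false := by simp [h3]
          have hb4 : (dir == "D") = false := by simp [h4]
          simp only [hb1, hb2, hb3, hb4, Bool.false_eq_true, if_false]
          show List.foldl (fun a _ => a) (l ++ [p]) _ = _
          rw [List.foldl_fixed]
          simp [pvScan]

theorem pvA_outer (ins : List (String × String)) : ∀ (l : List (Int × Int)) (p : Int × Int),
    ins.foldl pvFA (l ++ [p]) = (l ++ [p]) ++ pvScan p (pvFlat ins) := by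
  induction ins with
  | nil => intro l p; simp [pvFlat, pvScan]
  | cons i ins ih =>
    intro l p
    rw [List.foldl_cons, pvA_step]
    rcases pvShape (pvFlatOne i) p l with ⟨l', hl⟩
    rw [List.append_assoc] at hl ⊢
    rw [hl, ih l' _, pvFlat_cons, ← hl]
    rw [pvScan_append]
    simp

theorem pvB_phase1 (ins : List (String × String)) : ∀ (acc : List (Int × Int)),
    ins.foldl pvGB acc = acc ++ pvFlat ins := by
  induction ins with
  | nil => intro acc; simp [pvFlat]
  | cons i ins ih =>
    intro acc
    rw [List.foldl_cons, pvFlat_cons, ih]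
    have : pvGB acc i = acc ++ pvFlatOne i := by
      simp only [pvGB, pvFlatOne]
      cases pvDELTAS.get? i.1 <;> simp
    rw [this, List.append_assoc]

theorem pvB_phase2 (ds : List (Int × Int)) : ∀ (x y : Int) (out : List (Int × Int)),
    (ds.foldl pvF2 (x, y, out)).2.2 = out ++ pvScan (x, y) ds := by
  induction ds with
  | nil => intro x y out; simp [pvScan]
  | cons d ds ih =>
    intro x y out
    rw [List.foldl_cons]
    show (ds.foldl pvF2 (x + d.1, y + d.2, out ++ [(x + d.1, y + d.2)])).2.2 = _
    rw [ih]
    simp [pvScan]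

theorem pvA_eq (ins : List (String × String)) :
    head_positions ins = [((0 : Int), (0 : Int))] ++ pvScan (0, 0) (pvFlat ins) := by
  have h : head_positions ins = ins.foldl pvFA ([] ++ [((0 : Int), (0 : Int))]) := rfl
  rw [h, pvA_outer]
  rfl

theorem pvB_eq (ins : List (String × String)) :
    head_positions_alt ins = [((0 : Int), (0 : Int))] ++ pvScan (0, 0) (pvFlat ins) := by
  have h : head_positions_alt ins
      = ((ins.foldl pvGB []).foldl pvF2 (0, 0, [((0 : Int), (0 : Int))])).2.2 := rfl
  rw [h, pvB_phase1, pvB_phase2]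
  rfl

-- ===== VERDICT (by name: the statement is the Claim_ definition above) =====
theorem head_positions_spec : Claim_equal_head_positions := by
  intro ins _ _
  unfold Spec_head_positions
  rw [pvA_eq, pvB_eq]
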